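-- pv_equiv track=rewrite | github.com/varunsardana/UCSB-Datathon-2026 | disaster_forecast/generate_rag_profiles.py | get_risk_window
-- ===== SOURCE A (Python) =====
-- def get_risk_window(peak_months: list[str]) -> str:
--     """Describe the high-risk window for workforce planning."""
--     month_order = [
--         "January", "February", "March", "April", "May", "June",
--         "July", "August", "September", "October", "November", "December",
--     ]
--     months = [m.capitalize() for m in peak_months]
--     if not months:
--         return "year-round with no strong seasonal peak"
--     sorted_peaks = sorted(months, key=lambda m: month_order.index(m) if m in month_order else 99)
--     if len(sorted_peaks) == 1:
--         return sorted_peaks[0]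
--     return f"{sorted_peaks[0]}–{sorted_peaks[-1]}"
-- ===== SOURCE B (Python) =====
-- def get_risk_window(peak_months: list[str]) -> str:
--     """Describe the high-risk window for workforce planning."""
--     MONTH_INDEX = {
--         "January": 0, "February": 1, "March": 2, "April": 3, "May": 4, "June": 5,
--         "July": 6, "August": 7, "September": 8, "October": 9, "November": 10, "December": 11,
--     }
--     months = [m.capitalize() for m in peak_months]
--     if not months:
--         return "year-round with no strong seasonal peak"
--     if len(months) == 1:
--         return months[0]
--     lo = hi = months[0]
--     lo_k = hi_k = MONTH_INDEX.get(months[0], 99)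
--     for m in months[1:]:
--         k = MONTH_INDEX.get(m, 99)
--         if k < lo_k:
--             lo, lo_k = m, k
--         if hi_k <= k:
--             hi, hi_k = m, k
--     return f"{lo}\u2013{hi}"
-- ===== Notes on version B (the rewrite author's own statement) =====
-- stated objective: simpler
-- what changed: Replaces building month_order and stably sorting the capitalized list with a dict lookup for the order key and a single linear min/max scan (strict < for the low end, >= for the high end, mirroring the stable sort's endpoints).
import Mathlib
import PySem

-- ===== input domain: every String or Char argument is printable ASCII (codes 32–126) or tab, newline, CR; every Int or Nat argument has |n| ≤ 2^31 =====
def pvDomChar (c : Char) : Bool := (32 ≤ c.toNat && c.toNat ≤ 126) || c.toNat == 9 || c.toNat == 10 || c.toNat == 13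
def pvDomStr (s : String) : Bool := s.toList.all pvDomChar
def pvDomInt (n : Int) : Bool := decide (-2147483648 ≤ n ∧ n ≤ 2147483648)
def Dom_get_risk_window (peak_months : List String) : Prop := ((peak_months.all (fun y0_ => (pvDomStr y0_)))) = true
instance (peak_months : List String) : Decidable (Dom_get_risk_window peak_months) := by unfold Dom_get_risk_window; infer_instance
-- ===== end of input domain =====

-- B replaces A's build-month-list-and-stable-sort with a dict order key and one linear
-- min/max scan (strict < for the low endpoint, >= for the high endpoint): simpler, no sort.


-- shared primitive: Python str.capitalize() — first char uppercased, rest lowercased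
-- (exact on the ASCII domain, where title-casing the first char = upper-casing it)
def pyCapitalize (s : String) : String :=
  match s.toList with
  | [] => s
  | c :: cs => String.ofList (PySem.Chars.upperChar c :: PySem.Chars.lower cs)

-- ===== PORT A =====
def month_order : List String :=
  ["January", "February", "March", "April", "May", "June",
   "July", "August", "September", "October", "November", "December"]

-- key of A's sort: month_order.index(m) if m in month_order else 99
def keyA (m : String) : Nat :=
  if month_order.contains m then (PySem.List.index? month_order m).getD 99 else 99

def get_risk_window (peak_months : List String) : String :=
  let months := peak_months.map pyCapitalize
  if months = [] then "year-round with no strong seasonal peak"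
  else
    let sorted_peaks := PySem.List.sorted months keyA false
    if sorted_peaks.length = 1 then PySem.List.pyGetD sorted_peaks 0 ""
    else (PySem.List.pyGetD sorted_peaks 0 "") ++ "–" ++ (PySem.List.pyGetD sorted_peaks (-1) "")

-- ===== PORT B =====
def monthIndex : PySem.Dict String Nat :=
  PySem.Dict.ofList
    [("January", 0), ("February", 1), ("March", 2), ("April", 3), ("May", 4), ("June", 5),
     ("July", 6), ("August", 7), ("September", 8), ("October", 9), ("November", 10), ("December", 11)]

-- B's order key: MONTH_INDEX.get(m, 99)
def keyB (m : String) : Nat := PySem.Dict.getD monthIndex m 99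

-- the loop state: (lo, lo_k, hi, hi_k)
structure MMState where
  lo : String
  lok : Nat
  hi : String
  hik : Nat
deriving Repr, DecidableEq

def mmStep (s : MMState) (m : String) : MMState :=
  let k := keyB m
  let s := if k < s.lok then { s with lo := m, lok := k } else s
  if s.hik ≤ k then { s with hi := m, hik := k } else s

def get_risk_window_alt (peak_months : List String) : String :=
  let months := peak_months.map pyCapitalize
  match months with
  | [] => "year-round with no strong seasonal peak"
  | m0 :: rest =>
    if rest = [] then m0
    else
      let st := rest.foldl mmStep ⟨m0, keyB m0, m0, keyB m0⟩
      st.lo ++ "–" ++ st.hi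

-- ===== PRECONDITION & SPEC =====
def Spec_get_risk_window (peak_months : List String) (out : String) : Prop := out = get_risk_window_alt peak_months
instance (peak_months : List String) (out : String) : Decidable (Spec_get_risk_window peak_months out) := by unfold Spec_get_risk_window; infer_instance

-- ===== CLAIM (what is proved, stated in full; the proofs are below) =====
def Claim_equal_get_risk_window : Prop := ∀ (peak_months : List String), Dom_get_risk_window peak_months → Spec_get_risk_window peak_months (get_risk_window peak_months)

-- ===== LEMMAS AND PROOFS =====

-- the two keys agree
lemma keyB_eq_keyA (m : String) : keyB m = keyA m := by
  rcases eq_or_ne m "January" with h|h1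
  · subst h; decide
  rcases eq_or_ne m "February" with h|h2
  · subst h; decide
  rcases eq_or_ne m "March" with h|h3
  · subst h; decide
  rcases eq_or_ne m "April" with h|h4
  · subst h; decide
  rcases eq_or_ne m "May" with h|h5
  · subst h; decide
  rcases eq_or_ne m "June" with h|h6
  · subst h; decide
  rcases eq_or_ne m "July" with h|h7
  · subst h; decide
  rcases eq_or_ne m "August" with h|h8
  · subst h; decide
  rcases eq_or_ne m "September" with h|h9
  · subst h; decide
  rcases eq_or_ne m "October" with h|h10
  · subst h; decide
  rcases eq_or_ne m "November" with h|h11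
  · subst h; decide
  rcases eq_or_ne m "December" with h|h12
  · subst h; decide
  have hmk : monthIndex = PySem.Dict.mk
      [("January", 0), ("February", 1), ("March", 2), ("April", 3), ("May", 4), ("June", 5),
       ("July", 6), ("August", 7), ("September", 8), ("October", 9), ("November", 10), ("December", 11)] := by
    decide
  simp [keyA, keyB, hmk, PySem.Dict.getD, PySem.Dict.get?, month_order,
        h1, h2, h3, h4, h5, h6, h7, h8, h9, h10, h11, h12,
        Ne.symm h1, Ne.symm h2, Ne.symm h3, Ne.symm h4, Ne.symm h5, Ne.symm h6,
        Ne.symm h7, Ne.symm h8, Ne.symm h9, Ne.symm h10, Ne.symm h11, Ne.symm h12]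

-- abbreviations for A's insertion-sort step and B's two endpoint updates
def insA (acc : List String) (x : String) : List String :=
  PySem.List.insertBy (fun a b => decide (keyA a < keyA b)) x acc

def loStep (lo m : String) : String := if keyA m < keyA lo then m else lo
def hiStep (hi m : String) : String := if keyA hi ≤ keyA m then m else hi

lemma insA_ne_nil (acc : List String) (x : String) : insA acc x ≠ [] := by
  cases acc with
  | nil => simp [insA, PySem.List.insertBy]
  | cons y ys =>
    simp only [insA, PySem.List.insertBy]
    split <;> simp

lemma head?_insA (x y : String) (ys : List String) :
    (insA (y :: ys) x).head? = some (loStep y x) := by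
  simp only [insA, PySem.List.insertBy, loStep]
  split <;> rename_i hc <;> simp_all

lemma getLast?_insA (x : String) : ∀ (l : List String),
    l.Pairwise (fun a b => keyA a ≤ keyA b) → ∀ lst, l.getLast? = some lst →
    (insA l x).getLast? = some (hiStep lst x) := by
  intro l
  induction l with
  | nil => intro _ lst h; simp at h
  | cons y ys ih =>
    intro hp lst hlst
    cases ys with
    | nil =>
      simp only [List.getLast?_singleton, Option.some.injEq] at hlst
      obtain rfl := hlst
      simp only [insA, PySem.List.insertBy, hiStep]
      split <;> rename_i hc
      · rw [if_neg (by simp at hc; omega)]; simp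
      · rw [if_pos (by simp at hc; omega)]; simp
    | cons z t =>
      have hyz : ∀ b ∈ z :: t, keyA y ≤ keyA b := (List.pairwise_cons.mp hp).1
      have htp : (z :: t).Pairwise (fun a b => keyA a ≤ keyA b) := (List.pairwise_cons.mp hp).2
      rw [List.getLast?_cons_cons] at hlst
      have hmem : lst ∈ z :: t := List.mem_of_getLast? hlst
      rw [show insA (y :: z :: t) x
            = if decide (keyA x < keyA y) = true then x :: y :: z :: t
              else y :: insA (z :: t) x from rfl]
      split <;> rename_i hc
      · -- x goes to the front: last unchanged, and keyA x < keyA lst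
        have h2 : keyA x < keyA y := by simpa using hc
        have h1 : keyA y ≤ keyA lst := hyz _ hmem
        rw [List.getLast?_cons_cons, List.getLast?_cons_cons, hlst]
        simp only [hiStep]
        rw [if_neg (by omega)]
      · -- recurse into the tail
        have hrec := ih htp lst hlst
        cases hins : insA (z :: t) x with
        | nil => exact absurd hins (insA_ne_nil _ _)
        | cons w ws =>
          have hstep : (y :: w :: ws).getLast? = (w :: ws).getLast? := List.getLast?_cons_cons
          rw [hstep, ← hins]
          exact hrec

lemma sorted_append_singleton (p : List String) (x : String) :
    PySem.List.sorted (p ++ [x]) keyA false = insA (PySem.List.sorted p keyA false) x := by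
  rw [PySem.List.sorted_eq_foldl_insertBy, PySem.List.sorted_eq_foldl_insertBy, List.foldl_append]
  rfl

lemma head_fold : ∀ (xs p : List String) (hd : String),
    (PySem.List.sorted p keyA false).head? = some hd →
    (PySem.List.sorted (p ++ xs) keyA false).head? = some (xs.foldl loStep hd) := by
  intro xs
  induction xs with
  | nil => intro p hd h; simpa using h
  | cons x xs ih =>
    intro p hd h
    have h1 : p ++ x :: xs = (p ++ [x]) ++ xs := by simp
    rw [h1, List.foldl_cons]
    apply ih
    rw [sorted_append_singleton]
    cases hs : PySem.List.sorted p keyA false with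
    | nil => rw [hs] at h; simp at h
    | cons y ys =>
      rw [hs] at h
      simp only [List.head?_cons, Option.some.injEq] at h
      obtain rfl := h
      exact head?_insA _ _ _

lemma last_fold : ∀ (xs p : List String) (lst : String),
    (PySem.List.sorted p keyA false).getLast? = some lst →
    (PySem.List.sorted (p ++ xs) keyA false).getLast? = some (xs.foldl hiStep lst) := by
  intro xs
  induction xs with
  | nil => intro p lst h; simpa using h
  | cons x xs ih =>
    intro p lst h
    have h1 : p ++ x :: xs = (p ++ [x]) ++ xs := by simp
    rw [h1, List.foldl_cons]
    apply ih
    rw [sorted_append_singleton]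
    exact getLast?_insA x _ (PySem.List.sorted_pairwise p keyA) lst h

-- B's four-field fold is the pair of endpoint folds, with the cached keys invariant
lemma mm_fold : ∀ (xs : List String) (s : MMState), s.lok = keyA s.lo → s.hik = keyA s.hi →
    (xs.foldl mmStep s).lo = xs.foldl loStep s.lo ∧ (xs.foldl mmStep s).hi = xs.foldl hiStep s.hi := by
  intro xs
  induction xs with
  | nil => intro s _ _; exact ⟨rfl, rfl⟩
  | cons m xs ih =>
    intro s hlo hhi
    have hstep : (mmStep s m).lo = loStep s.lo m ∧ (mmStep s m).hi = hiStep s.hi m ∧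
        (mmStep s m).lok = keyA (mmStep s m).lo ∧ (mmStep s m).hik = keyA (mmStep s m).hi := by
      simp only [mmStep, loStep, hiStep, keyB_eq_keyA, hlo, hhi]
      split <;> split <;> simp_all
    have hih := ih (mmStep s m) hstep.2.2.1 hstep.2.2.2
    simp only [List.foldl_cons]
    rw [hih.1, hih.2, hstep.1, hstep.2.1]
    exact ⟨rfl, rfl⟩

-- ===== VERDICT (by name: the statement is the Claim_ definition above) =====
theorem get_risk_window_spec : Claim_equal_get_risk_window := by
  intro pm _
  unfold Spec_get_risk_window get_risk_window get_risk_window_alt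
  cases hm : pm.map pyCapitalize with
  | nil => simp
  | cons m0 rest =>
    cases rest with
    | nil =>
      have hs : PySem.List.sorted [m0] keyA false = [m0] := rfl
      simp [hs, PySem.List.pyGetD]
    | cons m1 rest' =>
      have hlen : (PySem.List.sorted (m0 :: m1 :: rest') keyA false).length = rest'.length + 2 := by
        rw [PySem.List.length_sorted]; simp
      have hs1 : PySem.List.sorted [m0] keyA false = [m0] := rfl
      have hsplit : (m0 :: m1 :: rest' : List String) = [m0] ++ (m1 :: rest') := by simp
      have hhead : (PySem.List.sorted (m0 :: m1 :: rest') keyA false).head?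
          = some ((m1 :: rest').foldl loStep m0) := by
        rw [hsplit]; exact head_fold (m1 :: rest') [m0] m0 (by rw [hs1]; rfl)
      have hlast : (PySem.List.sorted (m0 :: m1 :: rest') keyA false).getLast?
          = some ((m1 :: rest').foldl hiStep m0) := by
        rw [hsplit]; exact last_fold (m1 :: rest') [m0] m0 (by rw [hs1]; rfl)
      have hmm := mm_fold (m1 :: rest') ⟨m0, keyB m0, m0, keyB m0⟩ (keyB_eq_keyA m0) (keyB_eq_keyA m0)
      -- evaluate A's outer branches
      rw [if_neg (by simp : ¬(m0 :: m1 :: rest' : List String) = [])]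
      rw [if_neg (by rw [hlen]; omega)]
      -- A's endpoints
      cases hsort : PySem.List.sorted (m0 :: m1 :: rest') keyA false with
      | nil => rw [hsort] at hlen; simp at hlen
      | cons s0 ss =>
        rw [hsort] at hhead hlast
        have hs0 : s0 = (m1 :: rest').foldl loStep m0 := by simpa using hhead
        have hget0 : PySem.List.pyGetD (s0 :: ss) 0 "" = s0 := PySem.List.pyGetD_zero_cons s0 ss ""
        have hgetlast : PySem.List.pyGetD (s0 :: ss) (-1) "" = (m1 :: rest').foldl hiStep m0 := by
          rw [PySem.List.pyGetD_neg_one _ _ (by simp)]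
          have := List.getLast?_eq_some_getLast (l := s0 :: ss) (by simp)
          rw [this] at hlast
          exact Option.some.inj hlast
        rw [hget0, hgetlast, hs0]
        show _ = (if (m1 :: rest' : List String) = [] then m0 else
          (List.foldl mmStep ⟨m0, keyB m0, m0, keyB m0⟩ (m1 :: rest')).lo ++ "–" ++
          (List.foldl mmStep ⟨m0, keyB m0, m0, keyB m0⟩ (m1 :: rest')).hi)
        rw [if_neg (by simp : ¬(m1 :: rest' : List String) = []), hmm.1, hmm.2]
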